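-- pv_equiv track=rewrite | github.com/DamienLan/hangman-game | modules/word.py | build_occurence
-- ===== SOURCE A (Python) =====
-- def build_occurence(string):
--     """
--     return a dictionnary wich represent the occurencer of each letter
--     :param string:
--     :return: dictionnary
--     """
--     occurence = {}
--     for i in range(len(string)):
--         try:
--             occurence[string[i]].append(i)
--         except KeyError:
--             occurence[string[i]] = [i]
--
--     return occurence
-- ===== SOURCE B (Python) =====
-- def build_occurence(string):
--     """
--     return a dictionnary wich represent the occurencer of each letter
--     :param string:
--     :return: dictionnary
--     """
--     return {c: [i for i, ch in enumerate(string) if ch == c]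
--             for c in dict.fromkeys(string)}
-- ===== Notes on version B (the rewrite author's own statement) =====
-- stated objective: idiomatic
-- what changed: replaces the single-pass try/except dict-building loop by a dict comprehension over the distinct characters (dict.fromkeys order), each collecting its indices with a full enumerate scan
import Mathlib
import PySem

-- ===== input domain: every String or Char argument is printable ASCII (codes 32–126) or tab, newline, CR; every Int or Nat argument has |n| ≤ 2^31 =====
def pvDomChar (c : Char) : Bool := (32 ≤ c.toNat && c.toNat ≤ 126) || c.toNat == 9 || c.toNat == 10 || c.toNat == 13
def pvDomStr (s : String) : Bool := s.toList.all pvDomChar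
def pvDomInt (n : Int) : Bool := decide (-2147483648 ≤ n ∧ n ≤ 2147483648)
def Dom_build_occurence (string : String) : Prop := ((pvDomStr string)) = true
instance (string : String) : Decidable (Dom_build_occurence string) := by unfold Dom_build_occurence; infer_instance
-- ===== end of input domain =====

-- B replaces A's single forward pass with try/except by an idiomatic dict comprehension over the
-- distinct characters, collecting each character's indices with a full enumerate scan (not faster).

-- ===== PORT A =====
def build_occurence (string : String) : List (String × List Int) :=
  ((PySem.List.pyRange 0 (PySem.Str.len string) 1).foldl
    (fun (d : PySem.Dict String (List Int)) i =>
      match PySem.Str.pyGet? string i with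
      | none => d   -- unreachable: i ∈ range(len(string))
      | some c =>
        match d.get? (String.singleton c) with
        | some l => d.insert (String.singleton c) (l ++ [i])   -- occurence[string[i]].append(i)
        | none   => d.insert (String.singleton c) [i])         -- except KeyError: occurence[string[i]] = [i]
    PySem.Dict.empty).items

-- ===== PORT B =====
def build_occurence_alt (string : String) : List (String × List Int) :=
  (PySem.List.dedup string.toList).map (fun c =>
    (String.singleton c,
     ((PySem.List.enumerate string.toList 0).filter (fun p => p.2 == c)).map (fun p => p.1)))

-- ===== PRECONDITION & SPEC =====
def Spec_build_occurence (string : String) (out : List (String × List Int)) : Prop := out = build_occurence_alt string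
instance (string : String) (out : List (String × List Int)) : Decidable (Spec_build_occurence string out) := by unfold Spec_build_occurence; infer_instance

-- ===== CLAIM (what is proved, stated in full; the proofs are below) =====
def Claim_equal_build_occurence : Prop := ∀ (string : String), Dom_build_occurence string → Spec_build_occurence string (build_occurence string)

-- ===== LEMMAS AND PROOFS =====

-- the index list B computes for character c
def pvIdxs (cs : List Char) (c : Char) : List Int :=
  ((PySem.List.enumerate cs 0).filter (fun p => p.2 == c)).map (fun p => p.1)

-- A's loop body, phrased on the character list
def pvStep (cs : List Char) (d : PySem.Dict String (List Int)) (i : Int) :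
    PySem.Dict String (List Int) :=
  match PySem.List.pyGet? cs i with
  | none => d
  | some c =>
    match d.get? (String.singleton c) with
    | some l => d.insert (String.singleton c) (l ++ [i])
    | none   => d.insert (String.singleton c) [i]

lemma pvIdxs_append (xs : List Char) (x c : Char) :
    pvIdxs (xs ++ [x]) c = pvIdxs xs c ++ (if x = c then [(xs.length : Int)] else []) := by
  simp [pvIdxs, PySem.List.enumerate_append, PySem.List.enumerate_cons, List.filter_append]
  split_ifs with h
  · simp [h]
  · simp
    intro h'
    exact absurd h' h

lemma pvIdxs_of_not_mem (xs : List Char) (c : Char) (h : c ∉ xs) : pvIdxs xs c = [] := by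
  simp [pvIdxs, List.filter_eq_nil_iff]
  intro a b hab
  rw [PySem.List.mem_enumerate_iff] at hab
  rcases hab with ⟨k, hk, he⟩
  intro hbc
  exact h (by
    have : b = xs[k] := by simpa using congrArg Prod.snd he
    subst hbc; rw [this] at *; exact List.getElem_mem hk)

lemma pvMain (xs : List Char) :
    ((PySem.List.pyRange 0 (xs.length : Int) 1).foldl (pvStep xs) PySem.Dict.empty).items
      = (PySem.List.dedup xs).map (fun c => (String.singleton c, pvIdxs xs c)) := by
  induction xs using List.reverseRecOn with
  | nil => rfl
  | append_singleton xs x ih =>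
    have hlen : ((xs ++ [x]).length : Int) = (xs.length : Int) + 1 := by simp
    rw [hlen, PySem.List.pyRange_one_succ_right (by positivity),
        List.foldl_append]
    have hcongr : (PySem.List.pyRange 0 (xs.length : Int) 1).foldl (pvStep (xs ++ [x]))
        PySem.Dict.empty = (PySem.List.pyRange 0 (xs.length : Int) 1).foldl (pvStep xs)
        PySem.Dict.empty := by
      refine PySem.List.foldl_congr_mem _ _ _ _ (fun d i hi => ?_)
      rcases PySem.List.mem_pyRange_one.mp hi with ⟨h0, hlt⟩
      have : PySem.List.pyGet? (xs ++ [x]) i = PySem.List.pyGet? xs i := by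
        rw [PySem.List.pyGet?_of_nonneg _ h0, PySem.List.pyGet?_of_nonneg _ h0,
            List.getElem?_append_left (by omega)]
      simp [pvStep, this]
    rw [hcongr]
    simp only [List.foldl_cons, List.foldl_nil]
    have hget : PySem.List.pyGet? (xs ++ [x]) (xs.length : Int) = some x := by
      simp
    set d := (PySem.List.pyRange 0 (xs.length : Int) 1).foldl (pvStep xs) PySem.Dict.empty with hd
    have hitems : d.items = (PySem.List.dedup xs).map
        (fun c => (String.singleton c, pvIdxs xs c)) := ih
    have hkeys : d.keys = (PySem.List.dedup xs).map String.singleton := by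
      simp only [PySem.Dict.keys, hitems, List.map_map]; rfl
    have hnodup : d.keys.Nodup := by
      rw [hkeys]
      exact (PySem.List.nodup_dedup xs).map (fun a b h => by
        simpa using congrArg String.toList h)
    simp only [pvStep, hget, PySem.List.dedup_eq_ofList, PySem.Set.ofList_append_singleton]
    by_cases hx : x ∈ xs
    · -- x seen before: the existing entry gets index n appended, in place
      have hxm : x ∈ PySem.Set.ofList xs := (PySem.Set.mem_ofList _ _).mpr hx
      rw [PySem.Set.add_of_mem hxm]
      have hmem : (String.singleton x, pvIdxs xs x) ∈ d.items := by
        rw [hitems]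
        exact List.mem_map.mpr ⟨x, by simpa [PySem.List.dedup_eq_ofList] using hxm, rfl⟩
      have : d.get? (String.singleton x) = some (pvIdxs xs x) :=
        PySem.Dict.get?_of_mem_items _ hmem hnodup
      rw [this]
      have hcont : d.contains (String.singleton x) = true := by
        rw [PySem.Dict.contains_iff_mem_keys, hkeys]
        exact List.mem_map.mpr ⟨x, by simpa [PySem.List.dedup_eq_ofList] using hxm, rfl⟩
      rw [PySem.Dict.items_insert_of_contains _ _ hcont, hitems, List.map_map]
      refine List.map_congr_left (fun c hc => ?_)
      by_cases hcx : c = x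
      · subst hcx
        simp [pvIdxs_append]
      · have : ¬ (String.singleton c == String.singleton x) = true := by
          simp only [beq_iff_eq]
          exact fun h => hcx (by simpa using congrArg String.toList h)
        simp only [Function.comp]
        rw [pvIdxs_append]
        simp [this, Ne.symm hcx]
    · -- new character: appended at the end
      have hxm : x ∉ PySem.Set.ofList xs := fun h => hx ((PySem.Set.mem_ofList _ _).mp h)
      rw [PySem.Set.add_of_not_mem hxm]
      have hcont : d.contains (String.singleton x) = false := by
        rw [← Bool.not_eq_true, PySem.Dict.contains_iff_mem_keys, hkeys]
        intro hmem
        rcases List.mem_map.mp hmem with ⟨c, hc, hcs⟩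
        have : c = x := by simpa using congrArg String.toList hcs
        subst this
        exact hx ((PySem.Set.mem_ofList _ _).mp (by simpa [PySem.List.dedup_eq_ofList] using hc))
      have hget2 : d.get? (String.singleton x) = none := by
        rw [PySem.Dict.get?_eq_none_iff_contains]; exact hcont
      rw [hget2, PySem.Dict.items_insert_of_not_contains _ _ hcont, hitems, List.map_append]
      congr 1
      · refine List.map_congr_left (fun c hc => ?_)
        have hcx : c ≠ x := fun h => hx (by
          subst h
          exact (PySem.Set.mem_ofList _ _).mp (by simpa [PySem.List.dedup_eq_ofList] using hc))
        rw [pvIdxs_append]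
        simp [Ne.symm hcx]
      · simp [pvIdxs_append, pvIdxs_of_not_mem xs x hx]

-- ===== VERDICT (by name: the statement is the Claim_ definition above) =====
theorem build_occurence_spec : Claim_equal_build_occurence := by
  intro s _
  show build_occurence s = build_occurence_alt s
  have hA : build_occurence s =
      ((PySem.List.pyRange 0 (s.toList.length : Int) 1).foldl (pvStep s.toList)
        PySem.Dict.empty).items := rfl
  rw [hA, pvMain]
  rfl
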